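-- pv_equiv track=rewrite | github.com/Ivan-Tuzhilkin/angelina | angelina/use_tar.py | tar_processing
-- ===== SOURCE A (Python) =====
-- def tar_processing(compression_list):
--     '''
--     Функция подготавливает данные для правильного сжатия при создании архива.
--
--     @param - compression_list: список значений методов сжатия.
--     @type: list.
--
--     @value - tar_dict: словарь, где ключ - формат архива, а значение - метод сжатия.
--     @type: dict.
--
--     @return - tar_dict: словарь, где ключ - формат архива, а значение - метод сжатия.
--     @rtype: dict.
--     '''
--     tar_dict = {}
--     if len(compression_list) == 0:
--         tar_dict['.tar'] = 'w'
--     else: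
--         for i in compression_list:
--             if i == 'xz':
--                 tar_dict['.tar.xz'] = 'w:xz'
--             elif i == 'gz':
--                 tar_dict['.tar.gz'] = 'w:gz'
--             elif i == 'bz2':
--                 tar_dict['.tar.bz2'] = 'w:bz2'
--
--     return tar_dict
-- ===== SOURCE B (Python) =====
-- def tar_processing(compression_list):
--     if not compression_list:
--         return {'.tar': 'w'}
--     seen = []
--     for i in compression_list:
--         if i in ('xz', 'gz', 'bz2') and i not in seen:
--             seen.append(i)
--     return {'.tar.' + m: 'w:' + m for m in seen}
-- ===== Notes on version B (the rewrite author's own statement) =====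
-- stated objective: simpler
-- what changed: B replaces A's three-way if/elif dict-insertion loop with a first-occurrence dedup pass over the allowed methods followed by a dict comprehension that derives both key and value by string formatting.
import Mathlib
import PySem

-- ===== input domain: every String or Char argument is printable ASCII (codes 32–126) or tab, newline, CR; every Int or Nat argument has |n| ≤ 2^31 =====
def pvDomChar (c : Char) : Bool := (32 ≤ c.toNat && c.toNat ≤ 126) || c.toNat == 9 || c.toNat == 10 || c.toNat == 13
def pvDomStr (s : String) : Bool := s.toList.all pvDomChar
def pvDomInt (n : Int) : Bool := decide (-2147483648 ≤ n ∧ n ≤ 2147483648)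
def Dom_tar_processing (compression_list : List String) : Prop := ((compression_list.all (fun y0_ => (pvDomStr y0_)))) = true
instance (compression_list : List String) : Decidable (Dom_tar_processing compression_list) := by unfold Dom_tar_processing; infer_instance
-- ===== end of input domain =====

-- B is simpler: a first-occurrence dedup of the allowed methods followed by one dict
-- comprehension that formats both key and value, instead of A's three literal if/elif
-- insertion branches.

-- ===== PORT A =====
-- loop body of A's for-loop (the three-way if/elif over one element)
def tarStepA (d : PySem.Dict String String) (i : String) : PySem.Dict String String :=
  if i = "xz" then d.insert ".tar.xz" "w:xz"
  else if i = "gz" then d.insert ".tar.gz" "w:gz"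
  else if i = "bz2" then d.insert ".tar.bz2" "w:bz2"
  else d

def tar_processing (compression_list : List String) : List (String × String) :=
  if compression_list.length = 0 then
    ((PySem.Dict.empty : PySem.Dict String String).insert ".tar" "w").items
  else
    (compression_list.foldl tarStepA PySem.Dict.empty).items

-- ===== PORT B =====
-- loop body of B's dedup loop: keep i if it is an allowed method not seen before
def tarStepB (seen : List String) (i : String) : List String :=
  if (i = "xz" ∨ i = "gz" ∨ i = "bz2") ∧ i ∉ seen then seen ++ [i] else seen

def tar_processing_alt (compression_list : List String) : List (String × String) :=
  if compression_list = [] then [(".tar", "w")]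
  else
    -- the dict comprehension {'.tar.' + m: 'w:' + m for m in seen}
    ((compression_list.foldl tarStepB []).foldl
        (fun d m => d.insert (".tar." ++ m) ("w:" ++ m)) (PySem.Dict.empty : PySem.Dict String String)).items

-- ===== PRECONDITION & SPEC =====
def Spec_tar_processing (compression_list : List String) (out : List (String × String)) : Prop := out = tar_processing_alt compression_list
instance (compression_list : List String) (out : List (String × String)) : Decidable (Spec_tar_processing compression_list out) := by unfold Spec_tar_processing; infer_instance

-- ===== CLAIM (what is proved, stated in full; the proofs are below) =====
def Claim_equal_tar_processing : Prop := ∀ (compression_list : List String), Dom_tar_processing compression_list → Spec_tar_processing compression_list (tar_processing compression_list)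

-- ===== LEMMAS AND PROOFS =====

-- the allowed compression methods
def tarP3 (x : String) : Prop := x = "xz" ∨ x = "gz" ∨ x = "bz2"

-- one dict entry for method m
def tarF (m : String) : String × String := (".tar." ++ m, "w:" ++ m)

theorem tar_key_eq {x m : String} (hx : tarP3 x) (hm : tarP3 m) :
    (".tar." ++ x = ".tar." ++ m) ↔ x = m := by
  rcases hx with hx | hx | hx <;> rcases hm with hm | hm | hm <;> subst hx <;> subst hm <;> decide

-- inserting method m's entry into a dict whose items are seen's entries either leaves the
-- items unchanged (m already seen: same key, same value) or appends m's entry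
theorem tar_insert_mk (seen : List String) (m : String) (hm : tarP3 m)
    (h : ∀ x ∈ seen, tarP3 x) :
    (PySem.Dict.mk (seen.map tarF)).insert (".tar." ++ m) ("w:" ++ m)
      = PySem.Dict.mk ((if m ∈ seen then seen else seen ++ [m]).map tarF) := by
  apply PySem.Dict.ext
  rw [PySem.Dict.items_insert]
  have hc : (PySem.Dict.mk (seen.map tarF)).contains (".tar." ++ m) = decide (m ∈ seen) := by
    rw [PySem.Dict.contains_mk, List.any_map]
    by_cases hm' : m ∈ seen
    · simp only [hm', decide_true]
      rw [List.any_eq_true]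
      exact ⟨m, hm', by simp [tarF]⟩
    · simp only [hm', decide_false]
      rw [List.any_eq_false]
      intro x hx
      simp only [Function.comp, tarF, beq_iff_eq]
      intro he
      exact hm' ((tar_key_eq (h x hx) hm).mp he ▸ hx)
  rw [hc]
  by_cases hm' : m ∈ seen
  · simp only [hm', decide_true, if_pos]
    show (seen.map tarF).map _ = _
    rw [List.map_map]
    apply List.map_congr_left
    intro x hx
    simp only [Function.comp, tarF, beq_iff_eq]
    by_cases hxm : x = m
    · subst hxm; simp
    · rw [if_neg]; intro he
      exact hxm ((tar_key_eq (h x hx) hm).mp he)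
  · simp only [hm', decide_false, if_neg, Bool.false_eq_true, not_false_iff]
    show seen.map tarF ++ [(".tar." ++ m, "w:" ++ m)] = (seen ++ [m]).map tarF
    simp [tarF]

-- one step of A's loop, tracked on B's seen list
theorem tar_stepA_eq (seen : List String) (i : String) (h : ∀ x ∈ seen, tarP3 x) :
    tarStepA (PySem.Dict.mk (seen.map tarF)) i = PySem.Dict.mk ((tarStepB seen i).map tarF) := by
  unfold tarStepA tarStepB
  by_cases h1 : i = "xz"
  · subst h1
    rw [if_pos rfl]
    by_cases hm : "xz" ∈ seen
    · rw [if_neg (by simp [hm]), show (".tar.xz" : String) = ".tar." ++ "xz" from rfl,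
        show ("w:xz" : String) = "w:" ++ "xz" from rfl,
        tar_insert_mk seen "xz" (Or.inl rfl) h, if_pos hm]
    · rw [if_pos ⟨Or.inl rfl, hm⟩, show (".tar.xz" : String) = ".tar." ++ "xz" from rfl,
        show ("w:xz" : String) = "w:" ++ "xz" from rfl,
        tar_insert_mk seen "xz" (Or.inl rfl) h, if_neg hm]
  · rw [if_neg h1]
    by_cases h2 : i = "gz"
    · subst h2
      rw [if_pos rfl]
      by_cases hm : "gz" ∈ seen
      · rw [if_neg (by simp [hm]), show (".tar.gz" : String) = ".tar." ++ "gz" from rfl,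
          show ("w:gz" : String) = "w:" ++ "gz" from rfl,
          tar_insert_mk seen "gz" (Or.inr (Or.inl rfl)) h, if_pos hm]
      · rw [if_pos ⟨Or.inr (Or.inl rfl), hm⟩, show (".tar.gz" : String) = ".tar." ++ "gz" from rfl,
          show ("w:gz" : String) = "w:" ++ "gz" from rfl,
          tar_insert_mk seen "gz" (Or.inr (Or.inl rfl)) h, if_neg hm]
    · rw [if_neg h2]
      by_cases h3 : i = "bz2"
      · subst h3
        rw [if_pos rfl]
        by_cases hm : "bz2" ∈ seen
        · rw [if_neg (by simp [hm]), show (".tar.bz2" : String) = ".tar." ++ "bz2" from rfl,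
            show ("w:bz2" : String) = "w:" ++ "bz2" from rfl,
            tar_insert_mk seen "bz2" (Or.inr (Or.inr rfl)) h, if_pos hm]
        · rw [if_pos ⟨Or.inr (Or.inr rfl), hm⟩, show (".tar.bz2" : String) = ".tar." ++ "bz2" from rfl,
            show ("w:bz2" : String) = "w:" ++ "bz2" from rfl,
            tar_insert_mk seen "bz2" (Or.inr (Or.inr rfl)) h, if_neg hm]
      · rw [if_neg h3, if_neg (by rintro ⟨h4 | h4 | h4, -⟩ <;> contradiction)]

theorem tar_stepB_P3 (seen : List String) (i : String) (h : ∀ x ∈ seen, tarP3 x) :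
    ∀ x ∈ tarStepB seen i, tarP3 x := by
  unfold tarStepB
  split
  · rename_i hc
    intro x hx
    rcases List.mem_append.mp hx with hx | hx
    · exact h x hx
    · simpa using hc.1.imp (fun e => (List.mem_singleton.mp hx) ▸ e)
        (Or.imp (fun e => (List.mem_singleton.mp hx) ▸ e) (fun e => (List.mem_singleton.mp hx) ▸ e))
  · exact h

theorem tar_stepB_nodup (seen : List String) (i : String) (h : seen.Nodup) :
    (tarStepB seen i).Nodup := by
  unfold tarStepB
  split
  · rename_i hc
    refine List.Nodup.append h (List.nodup_singleton i) ?_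
    intro a ha hb
    rw [List.mem_singleton] at hb
    exact hc.2 (hb ▸ ha)
  · exact h

-- loop invariant: A's dict always holds exactly the entries of B's seen list, in order
theorem tar_loop_eq (l : List String) : ∀ (seen : List String), (∀ x ∈ seen, tarP3 x) →
    l.foldl tarStepA (PySem.Dict.mk (seen.map tarF))
      = PySem.Dict.mk ((l.foldl tarStepB seen).map tarF) := by
  induction l with
  | nil => intro seen _; rfl
  | cons i t ih =>
    intro seen h
    rw [List.foldl_cons, List.foldl_cons, tar_stepA_eq seen i h]
    exact ih (tarStepB seen i) (tar_stepB_P3 seen i h)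

theorem tar_foldB_P3 (l : List String) : ∀ seen, (∀ x ∈ seen, tarP3 x) →
    ∀ x ∈ l.foldl tarStepB seen, tarP3 x := by
  induction l with
  | nil => intro seen h; exact h
  | cons i t ih => intro seen h; exact ih _ (tar_stepB_P3 seen i h)

theorem tar_foldB_nodup (l : List String) : ∀ seen, seen.Nodup →
    (l.foldl tarStepB seen).Nodup := by
  induction l with
  | nil => intro seen h; exact h
  | cons i t ih => intro seen h; exact ih _ (tar_stepB_nodup seen i h)

-- ===== VERDICT (by name: the statement is the Claim_ definition above) =====
theorem tar_processing_spec : Claim_equal_tar_processing := by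
  intro l _
  unfold Spec_tar_processing tar_processing tar_processing_alt
  by_cases hl : l = []
  · subst hl; rfl
  · rw [if_neg (by simpa using hl), if_neg hl]
    have hA : l.foldl tarStepA PySem.Dict.empty = PySem.Dict.mk ((l.foldl tarStepB []).map tarF) :=
      tar_loop_eq l [] (by intro x hx; cases hx)
    rw [hA, PySem.Dict.items_foldl_insert_fresh (l.foldl tarStepB [])
        (fun m => ".tar." ++ m) (fun m => "w:" ++ m) PySem.Dict.empty
        (fun a _ => PySem.Dict.contains_empty _)
        (List.Nodup.map_on
          (fun x hx y hy he => (tar_key_eq (tar_foldB_P3 l [] (by intro x hx; cases hx) x hx)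
            (tar_foldB_P3 l [] (by intro x hx; cases hx) y hy)).mp he)
          (tar_foldB_nodup l [] List.nodup_nil))]
    rfl
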